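-- pv_equiv track=rewrite | github.com/sinetac-lancet/LiKou | OD机考原题/03Q1-机房布局.py | solve_method
-- ===== SOURCE A (Python) =====
-- from collections import deque
--
-- def solve_method(line):
--     n = len(line)
--     stack = deque() # 双端队列
--     stick = False
--
--     for i in range(n):
--         if line[i] == "M":  # 当前是否为机柜
--             # 判断left 和 right 是否越界，与 是否有和它紧邻的机柜，返回-1（无解）
--             left = i - 1 < 0 or line[i - 1] == "M"
--             right = i + 1 >= n or line[i + 1] == "M"
--             if left and right:
--                 return -1
--
--             '''
--             以下代码的理解：
--             （1）存储每一个M的区间间隔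
--             （2）将MIM这种类型合并成一个，因为这种情况只需要一个机箱
--             '''
--             # 使用一个栈来存储，当前机柜所处的区间，即[i-1, i+1]，注意不要越界
--             range_ = [max(0, i - 1), min(n - 1, i + 1)]
--             # 判断新区间与前一个区间是否紧邻，如果相邻，则将其合并到一个连续区间，如MIM
--             # 如果不紧邻那么就不用任何处理，直接运行到stack.append(range_)正常跟新区间即可
--             if stack and not stick:
--                 e1 = stack[-1][1]
--                 s2 = range_[0]
--
--                 if e1 == s2:
--                     stack.pop()
--                     stick = True
--             else:
--                 stick = False
--             stack.append(range_)
--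
--     return len(stack)
-- ===== SOURCE B (Python) =====
-- def solve_method(line):
--     n = len(line)
--     ms = [i for i, c in enumerate(line) if c == "M"]  # cabinet positions
--     if any((i == 0 or line[i - 1] == "M") and (i == n - 1 or line[i + 1] == "M") for i in ms):
--         return -1
--     # Cabinets separated by exactly one corridor cell form chains; a chain of k
--     # cabinets needs ceil(k/2) machine boxes.  Run-length count over the chains.
--     total = 0
--     run = 0
--     prev = None
--     for p in ms:
--         if prev is not None and p - prev == 2:
--             run += 1
--         else:
--             total += (run + 1) // 2
--             run = 1
--         prev = p
--     return total + (run + 1) // 2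
-- ===== Notes on version B (the rewrite author's own statement) =====
-- stated objective: alternative
-- what changed: B drops A's interval deque and stick flag entirely: it collects the cabinet positions, rejects blocked ones with one global check, then run-length groups the positions into chains at distance 2 and sums ceil(k/2) per chain of length k.
import Mathlib
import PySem

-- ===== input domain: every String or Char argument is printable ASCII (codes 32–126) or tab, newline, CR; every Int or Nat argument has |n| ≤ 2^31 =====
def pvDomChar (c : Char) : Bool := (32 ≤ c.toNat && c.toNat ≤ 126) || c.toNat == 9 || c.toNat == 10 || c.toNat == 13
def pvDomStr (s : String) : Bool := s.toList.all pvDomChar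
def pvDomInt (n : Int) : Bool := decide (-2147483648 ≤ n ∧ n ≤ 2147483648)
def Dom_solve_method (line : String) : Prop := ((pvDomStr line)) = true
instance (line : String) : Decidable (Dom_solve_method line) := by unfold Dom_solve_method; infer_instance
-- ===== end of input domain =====

-- B replaces A's interval stack + stick-flag merge by run-length arithmetic over the cabinet
-- positions: one global blocked-check, then chains of step-2 positions, each chain of
-- k cabinets contributing ceil(k/2) (objective: alternative).  Return values only; no mutation.

-- ===== PORT A =====
-- loop over range(n) with state (stack, stick); none = early `return -1`
def solveA_go (cs : List Char) (n : Nat) :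
    List Nat → List (Int × Int) → Bool → Option (List (Int × Int))
  | [], st, _ => some st
  | i :: rest, st, stick =>
    if cs.getD i ' ' == 'M' then
      let left := (i == 0) || (cs.getD (i - 1) ' ' == 'M')
      let right := (decide (i + 1 ≥ n)) || (cs.getD (i + 1) ' ' == 'M')
      if left && right then none
      else
        let range_ : Int × Int := (max 0 ((i : Int) - 1), min ((n : Int) - 1) ((i : Int) + 1))
        if !st.isEmpty && !stick then
          let e1 := (st.getLast?.getD (0, 0)).2
          if e1 == range_.1 then
            solveA_go cs n rest (st.dropLast ++ [range_]) true
          else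
            solveA_go cs n rest (st ++ [range_]) stick
        else
          solveA_go cs n rest (st ++ [range_]) false
    else solveA_go cs n rest st stick

def solve_method (line : String) : Int :=
  let cs := line.toList
  let n := cs.length
  match solveA_go cs n (List.range n) [] false with
  | none => -1
  | some st => (st.length : Int)

-- ===== PORT B =====
-- 'M' at i blocked on both sides (boundary or adjacent 'M')
def solveB_bad (cs : List Char) (n : Nat) (i : Nat) : Bool :=
  ((i == 0) || (cs.getD (i - 1) ' ' == 'M')) && ((i == n - 1) || (cs.getD (i + 1) ' ' == 'M'))

-- run-length loop over the 'M' positions: state (total, run, prev)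
def solveB_go : List Nat → Int → Int → Option Nat → Int
  | [], total, run, _ => total + PySem.Int.floordiv (run + 1) 2
  | p :: rest, total, run, prev =>
    match prev with
    | some q =>
      if ((p : Int) - (q : Int)) == 2 then solveB_go rest total (run + 1) (some p)
      else solveB_go rest (total + PySem.Int.floordiv (run + 1) 2) 1 (some p)
    | none => solveB_go rest (total + PySem.Int.floordiv (run + 1) 2) 1 (some p)

def solve_method_alt (line : String) : Int :=
  let cs := line.toList
  let n := cs.length
  let ms := (List.range n).filter (fun i => cs.getD i ' ' == 'M')
  if ms.any (solveB_bad cs n) then -1 else solveB_go ms 0 0 none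

-- ===== PRECONDITION & SPEC =====
def Spec_solve_method (line : String) (out : Int) : Prop := out = solve_method_alt line
instance (line : String) (out : Int) : Decidable (Spec_solve_method line out) := by unfold Spec_solve_method; infer_instance

-- ===== CLAIM (what is proved, stated in full; the proofs are below) =====
def Claim_equal_solve_method : Prop := ∀ (line : String), Dom_solve_method line → Spec_solve_method line (solve_method line)

-- ===== LEMMAS AND PROOFS =====

-- proof-side intermediate: A's scan re-expressed over the index list (Option = early -1)
def pvMs (cs : List Char) (n : Nat) : List Nat → Option (List Nat)
  | [] => some []
  | i :: rest =>
    if cs.getD i ' ' == 'M' then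
      if solveB_bad cs n i then none
      else (pvMs cs n rest).map (i :: ·)
    else pvMs cs n rest

-- proof-side intermediate: A's stateful counter (count, prevEnd, stick)
def pvCount (n : Int) : List Nat → Int → Int → Bool → Int
  | [], count, _, _ => count
  | p :: rest, count, prevEnd, stick =>
    let start := max 0 ((p : Int) - 1)
    if count > 0 && !stick && prevEnd == start then
      pvCount n rest count (min (n - 1) ((p : Int) + 1)) true
    else
      pvCount n rest (count + 1) (min (n - 1) ((p : Int) + 1)) false

lemma pvCount_cons (n : Int) (p : Nat) (rest : List Nat) (count prevEnd : Int) (stick : Bool) :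
    pvCount n (p :: rest) count prevEnd stick
      = if (count > 0 && !stick && (prevEnd == max 0 ((p : Int) - 1))) then
          pvCount n rest count (min (n - 1) ((p : Int) + 1)) true
        else
          pvCount n rest (count + 1) (min (n - 1) ((p : Int) + 1)) false := rfl

-- A reduced to (pvMs; pvCount)
lemma solve_key (cs : List Char) (n : Nat) :
    ∀ (idxs : List Nat) (st : List (Int × Int)) (stick : Bool) (pe : Int),
      (∀ j ∈ idxs, j < n) →
      (st ≠ [] → pe = (st.getLast?.getD (0, 0)).2) →
      (match solveA_go cs n idxs st stick with
        | none => (-1 : Int)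
        | some s => (s.length : Int))
      = (match pvMs cs n idxs with
        | none => (-1 : Int)
        | some ms => pvCount (n : Int) ms (st.length : Int) pe stick) := by
  intro idxs
  induction idxs with
  | nil => intro st stick pe _ _; simp [solveA_go, pvMs, pvCount]
  | cons i rest ih =>
    intro st stick pe hlt hpe
    have hi : i < n := hlt i (by simp)
    have hrest : ∀ j ∈ rest, j < n := fun j hj => hlt j (by simp [hj])
    simp only [solveA_go, pvMs]
    by_cases hM : (cs.getD i ' ' == 'M') = true
    case neg =>
      rw [if_neg hM, if_neg hM]
      exact ih st stick pe hrest hpe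
    rw [if_pos hM, if_pos hM]
    have hiff : (i + 1 ≥ n) ↔ (i = n - 1) := by omega
    have hb : (decide (i + 1 ≥ n)) = (i == n - 1) := by
      by_cases h : i = n - 1 <;> simp [hiff, h] <;> omega
    rw [hb]
    by_cases hlr : solveB_bad cs n i = true
    case pos => rw [show (((i == 0) || (cs.getD (i - 1) ' ' == 'M'))
        && ((i == n - 1) || (cs.getD (i + 1) ' ' == 'M'))) = true from hlr, if_pos rfl, if_pos hlr]
    have hlr' : (((i == 0) || (cs.getD (i - 1) ' ' == 'M'))
        && ((i == n - 1) || (cs.getD (i + 1) ' ' == 'M'))) = false := by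
      simpa [solveB_bad] using hlr
    rw [hlr', if_neg (by simp), if_neg hlr]
    by_cases hst : st.isEmpty
    · have hstnil : st = [] := List.isEmpty_iff.mp hst
      subst hstnil
      rw [if_neg (by simp)]
      have key := ih ([] ++ [(max 0 ((i : Int) - 1), min ((n : Int) - 1) ((i : Int) + 1))]) false ((max 0 ((i : Int) - 1), min ((n : Int) - 1) ((i : Int) + 1))).2 hrest (by simp)
      cases hbm : pvMs cs n rest with
      | none => simpa [hbm] using key
      | some ms =>
        simp only [Option.map_some]
        simp only [hbm] at key
        rw [key, pvCount_cons, if_neg (by simp)]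
        congr 1 <;> simp
    · have hstne : st ≠ [] := by simpa [List.isEmpty_iff] using hst
      have hpe' := hpe hstne
      by_cases hstick : stick
      · subst hstick
        rw [if_neg (by simp)]
        have key := ih (st ++ [(max 0 ((i : Int) - 1), min ((n : Int) - 1) ((i : Int) + 1))]) false ((max 0 ((i : Int) - 1), min ((n : Int) - 1) ((i : Int) + 1))).2 hrest (by simp)
        cases hbm : pvMs cs n rest with
        | none => simpa [hbm] using key
        | some ms =>
          simp only [Option.map_some]
          simp only [hbm] at key
          rw [key, pvCount_cons, if_neg (by simp)]
          congr 1 <;> simp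
      · have hstick' : stick = false := by simpa using hstick
        subst hstick'
        rw [if_pos (by simp [hst])]
        by_cases he : ((st.getLast?.getD (0, 0)).2 == ((max 0 ((i : Int) - 1), min ((n : Int) - 1) ((i : Int) + 1))).1) = true
        · rw [if_pos he]
          have hpeq : pe = max 0 ((i : Int) - 1) := by
            rw [hpe']; exact beq_iff_eq.mp he
          have key := ih (st.dropLast ++ [(max 0 ((i : Int) - 1), min ((n : Int) - 1) ((i : Int) + 1))]) true ((max 0 ((i : Int) - 1), min ((n : Int) - 1) ((i : Int) + 1))).2 hrest (by simp)
          cases hbm : pvMs cs n rest with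
          | none => simpa [hbm] using key
          | some ms =>
            simp only [Option.map_some]
            simp only [hbm] at key
            rw [key, pvCount_cons, if_pos (by simp [hpeq, List.length_pos_iff, hstne])]
            have h1 : 1 ≤ st.length := List.length_pos_iff.mpr hstne
            congr 1
            simp [List.length_dropLast]; omega
        · rw [if_neg he]
          have hne : (pe == max 0 ((i : Int) - 1)) = false := by
            rw [hpe']; simpa using he
          have key := ih (st ++ [(max 0 ((i : Int) - 1), min ((n : Int) - 1) ((i : Int) + 1))]) false ((max 0 ((i : Int) - 1), min ((n : Int) - 1) ((i : Int) + 1))).2 hrest (by simp)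
          cases hbm : pvMs cs n rest with
          | none => simpa [hbm] using key
          | some ms =>
            simp only [Option.map_some]
            simp only [hbm] at key
            rw [key, pvCount_cons, if_neg (by simp [hne])]
            congr 1 <;> simp

-- pvMs is the filtered index list guarded by the global bad-check
lemma pvMs_eq_filter (cs : List Char) (n : Nat) (idxs : List Nat) :
    pvMs cs n idxs
      = (if ((idxs.filter (fun i => cs.getD i ' ' == 'M')).any (solveB_bad cs n))
          then none else some (idxs.filter (fun i => cs.getD i ' ' == 'M'))) := by
  induction idxs with
  | nil => simp [pvMs]
  | cons i rest ih =>
    by_cases hM : (cs.getD i ' ' == 'M') = true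
    · by_cases hbad : solveB_bad cs n i = true
      · rw [pvMs, if_pos hM, if_pos hbad, List.filter_cons, if_pos hM, List.any_cons, hbad,
          Bool.true_or, if_pos rfl]
      · have hbad' : solveB_bad cs n i = false := Bool.eq_false_iff.mpr hbad
        rw [pvMs, if_pos hM, if_neg hbad, ih, List.filter_cons, if_pos hM, List.any_cons,
          hbad', Bool.false_or]
        cases hrest : (rest.filter (fun i => cs.getD i ' ' == 'M')).any (solveB_bad cs n) <;> simp
    · have hM'' : ¬ (cs[i]?.getD ' ' = 'M') := by
        simpa [List.getD_eq_getElem?_getD] using hM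
      rw [pvMs, if_neg hM, ih]
      simp [List.filter_cons, hM'']

-- pvCount mid-chain equals the run-length loop
lemma count_eq_go (n : Nat) :
    ∀ (ms : List Nat) (total run : Int) (q : Nat) (pe : Int),
      List.Pairwise (· < ·) (q :: ms) → (∀ p ∈ ms, p < n) → q < n →
      0 ≤ total → 1 ≤ run →
      (ms ≠ [] → pe = (q : Int) + 1) →
      pvCount (n : Int) ms (total + PySem.Int.floordiv (run + 1) 2) pe (run % 2 == 0)
        = solveB_go ms total run (some q) := by
  intro ms
  induction ms with
  | nil => intro total run q pe _ _ _ _ _ _; simp [pvCount, solveB_go]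
  | cons p rest ih =>
    intro total run q pe hpw hltn hq htot hrun hpe
    have hqp : q < p := by
      have := List.pairwise_cons.mp hpw
      exact this.1 p (by simp)
    have hpn : p < n := hltn p (by simp)
    have hpe' : pe = (q : Int) + 1 := hpe (by simp)
    have hpw' : List.Pairwise (· < ·) (p :: rest) := (List.pairwise_cons.mp hpw).2
    have hrestlt : ∀ j ∈ rest, p < j := fun j hj => (List.pairwise_cons.mp hpw').1 j hj
    have hrestn : ∀ j ∈ rest, j < n := fun j hj => hltn j (by simp [hj])
    have hfd : ∀ r : Int, PySem.Int.floordiv r 2 = r / 2 := by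
      intro r
      simp [PySem.Int.floordiv, Int.fdiv_eq_ediv]
    have hpe2 : (rest ≠ [] → min ((n : Int) - 1) ((p : Int) + 1) = (p : Int) + 1) := by
      intro hne
      cases rest with
      | nil => exact absurd rfl hne
      | cons j r =>
        have h1 : p < j := hrestlt j (by simp)
        have h2 : j < n := hrestn j (by simp)
        have : (p : Int) + 1 ≤ (n : Int) - 1 := by push_cast; omega
        omega
    have hcpos : 0 < total + PySem.Int.floordiv (run + 1) 2 := by
      rw [hfd]; omega
    rw [pvCount_cons]
    by_cases hadj : p = q + 2
    · -- same chain
      have hcond : (pe == max 0 ((p : Int) - 1)) = true := by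
        subst hadj; rw [hpe']; push_cast; simp; omega
      by_cases hodd : run % 2 = 0
      · -- stick was true: A restarts the pair, B keeps extending the run
        rw [if_neg (by simp [hodd])]
        have hB : solveB_go (p :: rest) total run (some q)
            = solveB_go rest total (run + 1) (some p) := by
          simp only [solveB_go]
          rw [if_pos (by subst hadj; push_cast; simp)]
        rw [hB]
        have key := ih total (run + 1) p (min ((n : Int) - 1) ((p : Int) + 1))
          hpw' hrestn hpn htot (by omega) hpe2
        rw [← key]
        have hstick : ((run + 1) % 2 == 0) = false := by simp; omega
        rw [hstick]
        congr 1
        rw [hfd, hfd]; omega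
      · -- stick was false: A merges, B extends the run without counting
        rw [if_pos (by simp [hcond, hcpos]; omega)]
        have hB : solveB_go (p :: rest) total run (some q)
            = solveB_go rest total (run + 1) (some p) := by
          simp only [solveB_go]
          rw [if_pos (by subst hadj; push_cast; simp)]
        rw [hB]
        have key := ih total (run + 1) p (min ((n : Int) - 1) ((p : Int) + 1))
          hpw' hrestn hpn htot (by omega) hpe2
        rw [← key]
        have hstick : ((run + 1) % 2 == 0) = true := by simp; omega
        rw [hstick]
        congr 1
        rw [hfd, hfd]; omega
    · -- chain breaks
      have hcond : (pe == max 0 ((p : Int) - 1)) = false := by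
        rw [hpe']
        have hmax : max 0 ((p : Int) - 1) = (p : Int) - 1 := by push_cast; omega
        rw [hmax]; simp; push_cast; omega
      rw [if_neg (by simp [hcond])]
      have hB : solveB_go (p :: rest) total run (some q)
          = solveB_go rest (total + PySem.Int.floordiv (run + 1) 2) 1 (some p) := by
        simp only [solveB_go]
        rw [if_neg (by push_cast; simp; omega)]
      rw [hB]
      have key := ih (total + PySem.Int.floordiv (run + 1) 2) 1 p
        (min ((n : Int) - 1) ((p : Int) + 1)) hpw' hrestn hpn (by rw [hfd]; omega) (by omega) hpe2
      rw [← key]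
      have hstick : ((1 : Int) % 2 == 0) = false := by decide
      rw [hstick]
      congr 1
      all_goals simp only [hfd]
      all_goals omega

-- ===== VERDICT (by name: the statement is the Claim_ definition above) =====
theorem solve_method_spec : Claim_equal_solve_method := by
  unfold Claim_equal_solve_method Spec_solve_method
  intro line _
  have main : ∀ (cs : List Char) (n : Nat),
      (match solveA_go cs n (List.range n) [] false with
        | none => (-1 : Int)
        | some st => (st.length : Int))
      = (if ((List.range n).filter (fun i => cs.getD i ' ' == 'M')).any (solveB_bad cs n) = true
          then -1
          else solveB_go ((List.range n).filter (fun i => cs.getD i ' ' == 'M')) 0 0 none) := by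
    intro cs n
    have key := solve_key cs n (List.range n) [] false (-2)
      (fun j hj => List.mem_range.mp hj) (by simp)
    simp only [List.length_nil, Nat.cast_zero] at key
    rw [key, pvMs_eq_filter]
    by_cases hbad : (((List.range n).filter (fun i => cs.getD i ' ' == 'M')).any (solveB_bad cs n)) = true
    · rw [if_pos hbad, if_pos hbad]
    · rw [if_neg hbad, if_neg hbad]
      have hpw : List.Pairwise (· < ·) ((List.range n).filter (fun i => cs.getD i ' ' == 'M')) :=
        (List.pairwise_lt_range (n := n)).filter _
      have hmem : ∀ p ∈ (List.range n).filter (fun i => cs.getD i ' ' == 'M'), p < n := by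
        intro p hp
        exact List.mem_range.mp (List.mem_of_mem_filter hp)
      cases hmscase : (List.range n).filter (fun i => cs.getD i ' ' == 'M') with
      | nil => simp only [pvCount, solveB_go]; decide
      | cons p rest =>
        rw [hmscase] at hpw hmem
        have hpn : p < n := hmem p (by simp)
        have hrestn : ∀ j ∈ rest, j < n := fun j hj => hmem j (by simp [hj])
        have hB : solveB_go (p :: rest) 0 0 none = solveB_go rest 0 1 (some p) := by
          have h0 : (0 : Int) + PySem.Int.floordiv (0 + 1) 2 = 0 := by decide
          simp only [solveB_go, h0]
        change pvCount (n : Int) (p :: rest) 0 (-2) false = solveB_go (p :: rest) 0 0 none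
        have hA : pvCount (n : Int) (p :: rest) 0 (-2) false
            = pvCount (n : Int) rest (0 + 1) (min ((n : Int) - 1) ((p : Int) + 1)) false := by
          rw [pvCount_cons, if_neg (by simp)]
        rw [hA, hB]
        have hpe2 : (rest ≠ [] → min ((n : Int) - 1) ((p : Int) + 1) = (p : Int) + 1) := by
          intro hne
          cases rest with
          | nil => exact absurd rfl hne
          | cons j r =>
            have h1 : p < j := (List.pairwise_cons.mp hpw).1 j (by simp)
            have h2 : j < n := hrestn j (by simp)
            have : (p : Int) + 1 ≤ (n : Int) - 1 := by push_cast; omega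
            omega
        have key2 := count_eq_go n rest 0 1 p (min ((n : Int) - 1) ((p : Int) + 1))
          hpw hrestn hpn le_rfl le_rfl hpe2
        have hfd22 : PySem.Int.floordiv (1 + 1) 2 = (1 : Int) := by decide
        rw [hfd22] at key2
        simpa using key2
  simpa [solve_method, solve_method_alt] using main line.toList line.toList.length
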